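-- pv_equiv track=rewrite | github.com/Camozor/molkky-python | main.py | est_elimine
-- ===== SOURCE A (Python) =====
-- def est_elimine(lancers):
--     rate_affile = 0
--     for lancer in lancers:
--         if len(lancer) == 0:
--             rate_affile += 1
--         else:
--             rate_affile = 0
--
--         if rate_affile == 3:
--             return True
--     return False
-- ===== SOURCE B (Python) =====
-- def est_elimine(lancers):
--     empty = [not l for l in lancers]
--     return any(a and b and c for a, b, c in zip(empty, empty[1:], empty[2:]))
-- ===== Notes on version B (the rewrite author's own statement) =====
-- stated objective: idiomatic
-- what changed: Replaces the incremental counter/reset loop with a sliding-window check: map each throw to its emptiness and test any triple of consecutive empties via zip of three shifted views.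
import Mathlib
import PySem

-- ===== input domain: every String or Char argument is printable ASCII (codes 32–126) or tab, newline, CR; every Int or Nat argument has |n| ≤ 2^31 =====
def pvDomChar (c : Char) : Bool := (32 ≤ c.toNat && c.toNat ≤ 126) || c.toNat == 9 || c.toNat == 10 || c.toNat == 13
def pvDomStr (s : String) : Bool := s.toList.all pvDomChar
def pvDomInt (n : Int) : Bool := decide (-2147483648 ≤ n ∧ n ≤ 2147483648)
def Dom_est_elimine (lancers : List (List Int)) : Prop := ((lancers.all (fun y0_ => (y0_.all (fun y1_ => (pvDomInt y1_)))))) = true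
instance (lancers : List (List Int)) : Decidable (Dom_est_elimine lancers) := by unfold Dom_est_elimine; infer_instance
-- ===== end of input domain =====

-- B replaces A's counter/reset loop by an idiomatic sliding-window check over three shifted views (map-emptiness + zip + any); same O(n) cost.


-- ===== PORT A =====
-- loop over lancers carrying rate_affile; early `return True` becomes returning true from the recursion
def estElimineLoopA : List (List Int) → Int → Bool
  | [], _ => false
  | lancer :: rest, rate_affile =>
    let rate_affile' : Int := if lancer.length == 0 then rate_affile + 1 else 0
    if rate_affile' == 3 then true else estElimineLoopA rest rate_affile'

def est_elimine (lancers : List (List Int)) : Bool := estElimineLoopA lancers 0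

-- ===== PORT B =====
-- empty = [not l for l in lancers]; any over zip(empty, empty[1:], empty[2:])
def est_elimine_alt (lancers : List (List Int)) : Bool :=
  let empty := lancers.map (fun l => l.isEmpty)
  (empty.zip ((PySem.List.slice empty (some 1) none).zip (PySem.List.slice empty (some 2) none))).any
    (fun p => p.1 && p.2.1 && p.2.2)

-- ===== PRECONDITION & SPEC =====
def Spec_est_elimine (lancers : List (List Int)) (out : Bool) : Prop := out = est_elimine_alt lancers
instance (lancers : List (List Int)) (out : Bool) : Decidable (Spec_est_elimine lancers out) := by unfold Spec_est_elimine; infer_instance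

-- ===== CLAIM (what is proved, stated in full; the proofs are below) =====
def Claim_equal_est_elimine : Prop := ∀ (lancers : List (List Int)), Dom_est_elimine lancers → Spec_est_elimine lancers (est_elimine lancers)

-- ===== LEMMAS AND PROOFS =====

-- `pe k xs` = the first k elements of xs exist and are all empty
def pe : Nat → List (List Int) → Bool
  | 0, _ => true
  | _ + 1, [] => false
  | k + 1, l :: rest => l.isEmpty && pe k rest

-- `w3 xs` = some window of three consecutive elements of xs is all-empty
def w3 : List (List Int) → Bool
  | [] => false
  | l :: rest => (l.isEmpty && pe 2 rest) || w3 rest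

theorem slice_one (xs : List Bool) : PySem.List.slice xs (some 1) none = xs.drop 1 := by
  simpa using PySem.List.slice_from_natCast xs 1

theorem slice_two (xs : List Bool) : PySem.List.slice xs (some 2) none = xs.drop 2 := by
  simpa using PySem.List.slice_from_natCast xs 2

theorem w3_absorb_pe3 (xs : List (List Int)) : (pe 3 xs || w3 xs) = w3 xs := by
  cases xs with
  | nil => rfl
  | cons a t => simp [pe, w3, Bool.or_assoc, Bool.or_self_left]

theorem pe2_or_pe1 (xs : List (List Int)) : (pe 1 xs || pe 2 xs) = pe 1 xs := by
  cases xs with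
  | nil => rfl
  | cons a t =>
    cases t with
    | nil => simp [pe]
    | cons b t' => cases ha : a.isEmpty <;> cases hb : b.isEmpty <;> simp [pe, ha, hb]

theorem loopA_eq (xs : List (List Int)) :
    ∀ r : Int, 0 ≤ r → r ≤ 2 →
      estElimineLoopA xs r = (pe (3 - r).toNat xs || w3 xs) := by
  induction xs with
  | nil =>
    intro r h0 h2
    have h1 : (3 - r).toNat ≥ 1 := by omega
    rcases Nat.exists_eq_add_of_le h1 with ⟨k, hk⟩
    simp only [estElimineLoopA, w3]
    rw [show (3 - r).toNat = k + 1 by omega]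
    simp [pe]
  | cons a t ih =>
    intro r h0 h2
    by_cases ha : a.isEmpty
    · have hlen : (a.length == 0) = true := by
        simp [List.isEmpty_iff, List.length_eq_zero_iff] at ha ⊢; exact ha
      by_cases hr : r = 2
      · subst hr
        simp only [estElimineLoopA, hlen, if_true, eq_self_iff_true]
        norm_num
        exact Or.inl (by simp [pe, ha])
      · have hne : ¬ (((r + 1 : Int) == 3) = true) := by simp; omega
        simp only [estElimineLoopA, hlen, if_true, eq_self_iff_true]
        rw [if_neg hne]
        rw [ih (r + 1) (by omega) (by omega)]
        rw [show (3 - r).toNat = (3 - (r + 1)).toNat + 1 by omega]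
        simp only [pe, ha, Bool.true_and, w3]
        have hr01 : r = 0 ∨ r = 1 := by omega
        rcases hr01 with h | h <;> subst h
        · rw [show ((3 : Int) - (0 + 1)).toNat = 2 by decide]
          simp [Bool.or_comm, Bool.or_assoc, Bool.or_left_comm]
        · rw [show ((3 : Int) - (1 + 1)).toNat = 1 by decide]
          conv_rhs => rw [← Bool.or_assoc, pe2_or_pe1]
    · have hlen : (a.length == 0) = false := by
        simp [List.isEmpty_iff, List.length_eq_zero_iff] at ha ⊢; exact ha
      simp only [estElimineLoopA, hlen, Bool.false_eq_true, if_false]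
      norm_num
      rw [ih 0 le_rfl (by decide)]
      rw [show ((3 : Int) - 0).toNat = 3 by decide]
      rw [w3_absorb_pe3]
      have hpe : pe (3 - r).toNat (a :: t) = false := by
        have h1 : (3 - r).toNat ≥ 1 := by omega
        rcases Nat.exists_eq_add_of_le h1 with ⟨k, hk⟩
        rw [show (3 - r).toNat = k + 1 by omega]
        simp [pe, ha]
      rw [hpe]
      simp [w3, ha]

theorem alt_eq_w3 (xs : List (List Int)) : est_elimine_alt xs = w3 xs := by
  induction xs with
  | nil => rfl
  | cons a t ih =>
    cases t with
    | nil => simp [est_elimine_alt, w3, pe, slice_one, slice_two]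
    | cons b t' =>
      cases t' with
      | nil => simp [est_elimine_alt, w3, pe, slice_one, slice_two]
      | cons c t'' =>
        simp only [est_elimine_alt, slice_one, slice_two] at ih ⊢
        simp only [List.map_cons, List.drop_succ_cons, List.drop_zero,
          List.zip_cons_cons, List.any_cons] at ih ⊢
        rw [ih]
        simp [w3, pe, Bool.and_assoc]

-- ===== VERDICT (by name: the statement is the Claim_ definition above) =====
theorem est_elimine_spec : Claim_equal_est_elimine := by
  intro lancers _
  unfold Spec_est_elimine est_elimine
  rw [loopA_eq lancers 0 le_rfl (by decide), alt_eq_w3]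
  rw [show ((3 : Int) - 0).toNat = 3 by decide]
  exact (w3_absorb_pe3 lancers)
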